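-- pv_equiv track=rewrite | github.com/1475505/Miliastra-toolbox-primitive-shape | primitive_backend.py | _normalize_allowed_shapes
-- ===== SOURCE A (Python) =====
-- SHAPE_MODE_MAP = {"triangle": 1, "rect": 5, "circle": 7}
--
-- SHAPE_ORDER = ("circle", "rect", "triangle")
--
-- def _normalize_allowed_shapes(allowed_shapes):
--     requested = [str(name).strip().lower() for name in (allowed_shapes or ["circle"])]
--     normalized = []
--     for name in SHAPE_ORDER:
--         if name in requested and name not in normalized:
--             normalized.append(name)
--     for name in requested:
--         if name in SHAPE_MODE_MAP and name not in normalized: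
--             normalized.append(name)
--     return normalized or ["circle"]
-- ===== SOURCE B (Python) =====
-- SHAPE_MODE_MAP = {"triangle": 1, "rect": 5, "circle": 7}
--
-- SHAPE_ORDER = ("circle", "rect", "triangle")
--
-- def _normalize_allowed_shapes(allowed_shapes):
--     requested = [str(name).strip().lower() for name in (allowed_shapes or ["circle"])]
--     valid = {n for n in requested if n in SHAPE_MODE_MAP}
--     return sorted(valid, key=SHAPE_ORDER.index) or ["circle"]
-- ===== Notes on version B (the rewrite author's own statement) =====
-- stated objective: simpler
-- what changed: Instead of scanning the fixed SHAPE_ORDER testing membership plus a dead second loop over the request, B collects the valid names into a set (which deduplicates) and sorts them by their SHAPE_ORDER rank.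
import Mathlib
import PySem

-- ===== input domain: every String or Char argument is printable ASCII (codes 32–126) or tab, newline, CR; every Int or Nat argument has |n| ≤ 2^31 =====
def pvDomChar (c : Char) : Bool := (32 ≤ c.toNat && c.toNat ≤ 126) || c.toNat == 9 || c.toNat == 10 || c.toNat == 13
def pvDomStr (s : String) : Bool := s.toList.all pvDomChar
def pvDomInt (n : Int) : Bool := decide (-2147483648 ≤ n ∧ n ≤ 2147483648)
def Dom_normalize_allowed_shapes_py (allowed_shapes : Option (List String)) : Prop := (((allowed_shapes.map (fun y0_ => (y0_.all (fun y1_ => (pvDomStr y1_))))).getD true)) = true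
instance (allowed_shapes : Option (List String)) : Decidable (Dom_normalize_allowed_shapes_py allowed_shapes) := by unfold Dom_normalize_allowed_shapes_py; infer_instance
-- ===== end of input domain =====

-- B replaces A's scan of SHAPE_ORDER plus a dead second loop by a filtered set sorted by SHAPE_ORDER rank (objective: simpler).

-- ===== PORT A =====
-- SHAPE_MODE_MAP's keys, in insertion order (only membership in the dict is used by A)
def shapeModeKeys : List String := ["triangle", "rect", "circle"]
-- SHAPE_ORDER
def shapeOrder : List String := ["circle", "rect", "triangle"]
-- 'allowed_shapes or ["circle"]'
def pvBase (allowed_shapes : Option (List String)) : List String :=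
  match allowed_shapes with
  | none => ["circle"]
  | some xs => if xs = [] then ["circle"] else xs

def normalize_allowed_shapes_py (allowed_shapes : Option (List String)) : List String :=
  let requested := (pvBase allowed_shapes).map (fun s => PySem.Str.lower (PySem.Str.strip s))
  let normalized := shapeOrder.foldl
    (fun acc name => if requested.contains name && !acc.contains name then acc ++ [name] else acc) []
  let normalized := requested.foldl
    (fun acc name => if shapeModeKeys.contains name && !acc.contains name then acc ++ [name] else acc) normalized
  if normalized = [] then ["circle"] else normalized

-- ===== PORT B =====
def normalize_allowed_shapes_py_alt (allowed_shapes : Option (List String)) : List String :=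
  let requested := (pvBase allowed_shapes).map (fun s => PySem.Str.lower (PySem.Str.strip s))
  let valid : PySem.Set String := PySem.Set.ofList (requested.filter (fun n => shapeModeKeys.contains n))
  let res := PySem.List.sorted valid (fun n => shapeOrder.idxOf n) false
  if res = [] then ["circle"] else res

-- ===== PRECONDITION & SPEC =====
def Spec_normalize_allowed_shapes_py (allowed_shapes : Option (List String)) (out : List String) : Prop := out = normalize_allowed_shapes_py_alt allowed_shapes
instance (allowed_shapes : Option (List String)) (out : List String) : Decidable (Spec_normalize_allowed_shapes_py allowed_shapes out) := by unfold Spec_normalize_allowed_shapes_py; infer_instance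

-- ===== CLAIM (what is proved, stated in full; the proofs are below) =====
def Claim_equal_normalize_allowed_shapes_py : Prop := ∀ (allowed_shapes : Option (List String)), Dom_normalize_allowed_shapes_py allowed_shapes → Spec_normalize_allowed_shapes_py allowed_shapes (normalize_allowed_shapes_py allowed_shapes)

-- ===== LEMMAS AND PROOFS =====

-- the canonical answer, as a function of which of the three names the request contains
def pvCanon (c r t : Bool) : List String :=
  (if c then ["circle"] else []) ++ (if r then ["rect"] else []) ++ (if t then ["triangle"] else [])

-- A's second loop adds nothing once the accumulator already holds every valid requested name
lemma second_fold_id (req : List String) : ∀ acc : List String,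
    (∀ x ∈ req, x ∈ shapeModeKeys → x ∈ acc) →
    req.foldl (fun a n => if shapeModeKeys.contains n && !a.contains n then a ++ [n] else a) acc = acc := by
  induction req with
  | nil => intro acc _; rfl
  | cons x xs ih =>
    intro acc h
    have hcond : (shapeModeKeys.contains x && !acc.contains x) = false := by
      by_cases hk : x ∈ shapeModeKeys
      · simp [h x (by simp) hk]
      · simp [hk]
    simp only [List.foldl_cons, hcond, Bool.false_eq_true, if_false]
    exact ih acc (fun y hy => h y (by simp [hy]))

-- A's result on a request, characterised by the three membership booleans
lemma portA_core (req : List String) :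
    (req.foldl
      (fun acc name => if shapeModeKeys.contains name && !acc.contains name then acc ++ [name] else acc)
      (shapeOrder.foldl
        (fun acc name => if req.contains name && !acc.contains name then acc ++ [name] else acc) []))
    = pvCanon (decide ("circle" ∈ req)) (decide ("rect" ∈ req)) (decide ("triangle" ∈ req)) := by
  have hfirst : (shapeOrder.foldl
      (fun acc name => if req.contains name && !acc.contains name then acc ++ [name] else acc) [])
      = pvCanon (decide ("circle" ∈ req)) (decide ("rect" ∈ req)) (decide ("triangle" ∈ req)) := by
    by_cases hc : "circle" ∈ req <;> by_cases hr : "rect" ∈ req <;> by_cases ht : "triangle" ∈ req <;>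
      simp [shapeOrder, pvCanon, hc, hr, ht, List.foldl]
  rw [hfirst]
  apply second_fold_id
  intro x hx hk
  have hx3 : x = "triangle" ∨ x = "rect" ∨ x = "circle" := by simpa [shapeModeKeys] using hk
  rcases hx3 with h3 | h3 | h3 <;> subst h3 <;> simp [pvCanon, hx]

-- B's result on a request: the sorted valid set is the same canonical list
lemma portB_core (req : List String) :
    PySem.List.sorted (PySem.Set.ofList (req.filter (fun n => shapeModeKeys.contains n)))
        (fun n => shapeOrder.idxOf n) false
    = pvCanon (decide ("circle" ∈ req)) (decide ("rect" ∈ req)) (decide ("triangle" ∈ req)) := by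
  apply PySem.List.sorted_eq_of_perm_of_pairwise_lt
  · -- permutation: both are nodup with the same members
    rw [List.perm_ext_iff_of_nodup ?_ (PySem.Set.nodup_ofList _)]
    · intro x
      constructor
      · intro hx
        have hx' : (x = "circle" ∧ "circle" ∈ req) ∨ (x = "rect" ∧ "rect" ∈ req) ∨
            (x = "triangle" ∧ "triangle" ∈ req) := by
          by_cases hc : "circle" ∈ req <;> by_cases hr : "rect" ∈ req <;> by_cases ht : "triangle" ∈ req <;>
            simp [pvCanon, hc, hr, ht] at hx <;> tauto
        rw [PySem.Set.mem_ofList, List.mem_filter]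
        rcases hx' with ⟨h3, hm⟩ | ⟨h3, hm⟩ | ⟨h3, hm⟩ <;> subst h3 <;>
          simp [hm, shapeModeKeys]
      · intro hx
        have hx' : x ∈ req.filter (fun n => shapeModeKeys.contains n) := by
          simpa [PySem.Set.mem_ofList] using hx
        have hmem : x ∈ req := (List.mem_filter.mp hx').1
        have hk : x ∈ shapeModeKeys := by
          have := (List.mem_filter.mp hx').2
          simpa [List.contains_iff_mem] using this
        have hx3 : x = "triangle" ∨ x = "rect" ∨ x = "circle" := by simpa [shapeModeKeys] using hk
        rcases hx3 with h3 | h3 | h3 <;> subst h3 <;> simp [pvCanon, hmem]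
    · -- pvCanon is nodup
      by_cases hc : "circle" ∈ req <;> by_cases hr : "rect" ∈ req <;> by_cases ht : "triangle" ∈ req <;>
        simp [pvCanon, hc, hr, ht]
  · -- pvCanon has strictly increasing SHAPE_ORDER ranks
    by_cases hc : "circle" ∈ req <;> by_cases hr : "rect" ∈ req <;> by_cases ht : "triangle" ∈ req <;>
      simp only [pvCanon, hc, hr, ht, decide_true, decide_false, if_true] <;> decide

-- ===== VERDICT (by name: the statement is the Claim_ definition above) =====
theorem normalize_allowed_shapes_py_spec : Claim_equal_normalize_allowed_shapes_py := by
  intro allowed_shapes _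
  unfold Spec_normalize_allowed_shapes_py normalize_allowed_shapes_py normalize_allowed_shapes_py_alt
  simp only [portA_core, portB_core]
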